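-- pv_equiv track=rewrite | github.com/ashwineepandey/mlai-natural-language-processing | src/a1_bpe.py | get_vocab_overlap
-- ===== SOURCE A (Python) =====
-- from typing import List, Tuple, Dict
--
-- def get_vocab_overlap(vocabs: Dict[str, Dict[str, int]]) -> Dict[Tuple[str, str], int]:
--     """
--     Function to get the overlap of the BPE subword vocabulary between each of the languages.
--
--     Args:
--     vocabs (Dict[str, Dict[str, int]]): Dictionary of BPE vocabularies for each language.
--
--     Returns:
--     Dict[Tuple[str, str], int]: Overlap of the BPE subword vocabulary between each of the languages.
--     """
--     overlaps = {}
--     languages = list(vocabs.keys())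
--     for i in range(len(languages)):
--         for j in range(i+1, len(languages)):
--             lang1, lang2 = languages[i], languages[j]
--             overlap = len(set(vocabs[lang1].keys()) & set(vocabs[lang2].keys()))
--             overlaps[(lang1, lang2)] = overlap
--     return overlaps
-- ===== SOURCE B (Python) =====
-- def get_vocab_overlap(vocabs):
--     """Inverted-index re-implementation: one pass over tokens instead of a
--     set intersection per language pair."""
--     languages = list(vocabs.keys())
--     overlaps = {}
--     for i in range(len(languages)):
--         for j in range(i + 1, len(languages)):
--             overlaps[(languages[i], languages[j])] = 0
--     index = {}
--     for pos, vocab in enumerate(vocabs.values()):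
--         for token in vocab:
--             index.setdefault(token, []).append(pos)
--     for posting in index.values():
--         for a in range(len(posting)):
--             for b in range(a + 1, len(posting)):
--                 overlaps[(languages[posting[a]], languages[posting[b]])] += 1
--     return overlaps
-- ===== Notes on version B (the rewrite author's own statement) =====
-- stated objective: alternative
-- what changed: Replaces the per-pair set-intersection (building two sets and intersecting them for every language pair) by an inverted index token -> list of language positions built in one pass, then incrementing the pre-initialized pair counters from each token's posting list.
import Mathlib
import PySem

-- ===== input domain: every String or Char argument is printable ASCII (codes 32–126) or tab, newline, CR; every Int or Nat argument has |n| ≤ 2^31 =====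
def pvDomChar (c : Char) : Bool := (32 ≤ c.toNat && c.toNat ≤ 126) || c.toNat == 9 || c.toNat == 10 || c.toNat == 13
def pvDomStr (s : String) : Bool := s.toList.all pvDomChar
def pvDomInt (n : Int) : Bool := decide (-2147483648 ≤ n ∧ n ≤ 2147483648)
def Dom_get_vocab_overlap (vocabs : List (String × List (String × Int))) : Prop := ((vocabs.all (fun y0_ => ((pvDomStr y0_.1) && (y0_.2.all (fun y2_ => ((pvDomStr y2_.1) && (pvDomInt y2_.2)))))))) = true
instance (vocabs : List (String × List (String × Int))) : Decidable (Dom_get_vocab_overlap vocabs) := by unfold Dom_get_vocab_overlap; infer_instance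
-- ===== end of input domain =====

-- B replaces A's per-pair set intersection by an inverted index (token -> language positions)
-- whose posting lists increment pre-initialized pair counters: an alternative algorithm, same results.


-- ===== PORT A =====
def get_vocab_overlap (vocabs : List (String × List (String × Int))) : List (String × String × Int) :=
  let languages := (PySem.Dict.mk vocabs).keys
  let overlaps : PySem.Dict (String × String) Int :=
    (PySem.List.pyRange 0 languages.length 1).foldl (fun ov i =>
      (PySem.List.pyRange (i+1) languages.length 1).foldl (fun ov j =>
        let lang1 := PySem.List.pyGetD languages i ""
        let lang2 := PySem.List.pyGetD languages j ""
        let overlap := PySem.Set.len (PySem.Set.inter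
          (PySem.Set.ofList (((PySem.Dict.mk vocabs).getD lang1 []).map Prod.fst))
          (PySem.Set.ofList (((PySem.Dict.mk vocabs).getD lang2 []).map Prod.fst)))
        ov.insert (lang1, lang2) overlap) ov)
      PySem.Dict.empty
  overlaps.items.map (fun p => (p.1.1, p.1.2, p.2))

-- ===== PORT B =====
def get_vocab_overlap_alt (vocabs : List (String × List (String × Int))) : List (String × String × Int) :=
  let languages := (PySem.Dict.mk vocabs).keys
  let overlaps0 : PySem.Dict (String × String) Int :=
    (PySem.List.pyRange 0 languages.length 1).foldl (fun ov i =>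
      (PySem.List.pyRange (i+1) languages.length 1).foldl (fun ov j =>
        ov.insert (PySem.List.pyGetD languages i "", PySem.List.pyGetD languages j "") 0) ov)
      PySem.Dict.empty
  let index : PySem.Dict String (List Int) :=
    (PySem.List.enumerate ((PySem.Dict.mk vocabs).values)).foldl (fun d pv =>
      ((PySem.Dict.mk pv.2).keys).foldl (fun d token => d.modify token [] (· ++ [pv.1])) d)
      PySem.Dict.empty
  let overlaps :=
    index.values.foldl (fun ov posting =>
      (PySem.List.pyRange 0 posting.length 1).foldl (fun ov a =>
        (PySem.List.pyRange (a+1) posting.length 1).foldl (fun ov b =>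
          ov.modify (PySem.List.pyGetD languages (PySem.List.pyGetD posting a 0) "",
                     PySem.List.pyGetD languages (PySem.List.pyGetD posting b 0) "") 0 (· + 1)) ov) ov)
      overlaps0
  overlaps.items.map (fun p => (p.1.1, p.1.2, p.2))

-- ===== PRECONDITION & SPEC =====
-- Pre_ says the association lists really represent a Python dict of dicts: keys are distinct at
-- both levels (duplicate-key lists cannot arise from A's argument type 'Dict[str, Dict[str, int]]').
def Pre_get_vocab_overlap (vocabs : List (String × List (String × Int))) : Prop :=
  (vocabs.map Prod.fst).Nodup ∧ ∀ p ∈ vocabs, (p.2.map Prod.fst).Nodup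
instance (vocabs : List (String × List (String × Int))) : Decidable (Pre_get_vocab_overlap vocabs) := by
  unfold Pre_get_vocab_overlap; infer_instance
def pvWitness_get_vocab_overlap : (List (String × List (String × Int))) :=
  [("en", [("ab", 1), ("cd", 2)]), ("fr", [("ab", 3)]), ("de", [])]

def Spec_get_vocab_overlap (vocabs : List (String × List (String × Int))) (out : List (String × String × Int)) : Prop := out = get_vocab_overlap_alt vocabs
instance (vocabs : List (String × List (String × Int))) (out : List (String × String × Int)) : Decidable (Spec_get_vocab_overlap vocabs out) := by unfold Spec_get_vocab_overlap; infer_instance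

-- ===== CLAIM (what is proved, stated in full; the proofs are below) =====
def Claim_equal_get_vocab_overlap : Prop := ∀ (vocabs : List (String × List (String × Int))), Dom_get_vocab_overlap vocabs → Pre_get_vocab_overlap vocabs → Spec_get_vocab_overlap vocabs (get_vocab_overlap vocabs)

-- ===== LEMMAS AND PROOFS =====

-- Structural "ordered pairs" of a list: (x, y) for every x before y.
def pvSP {α : Type} : List α → List (α × α)
  | [] => []
  | x :: xs => xs.map (fun y => (x, y)) ++ pvSP xs

-- The i<j index-pair list both ports' double loops run over.
def pvPairs (n : Int) : List (Int × Int) :=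
  (PySem.List.pyRange 0 n 1).flatMap (fun i => (PySem.List.pyRange (i+1) n 1).map (fun j => (i, j)))

-- token lists per language position, and the posting list of a token
def pvK (vocabs : List (String × List (String × Int))) (i : Int) : List String :=
  (PySem.List.pyGetD (vocabs.map Prod.snd) i []).map Prod.fst
def pvPost (vocabs : List (String × List (String × Int))) (t : String) : List Int :=
  (PySem.List.pyRange 0 (vocabs.length : Int) 1).filter (fun i => decide (t ∈ pvK vocabs i))

theorem pv_mem_pairs (n : Int) (p : Int × Int) :
    p ∈ pvPairs n ↔ 0 ≤ p.1 ∧ p.1 < p.2 ∧ p.2 < n := by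
  obtain ⟨i, j⟩ := p
  simp [pvPairs, List.mem_flatMap, PySem.List.mem_pyRange_one]
  omega

theorem pv_sp_triangle {α β : Type} (xs : List α) (d : α) (g : α → α → β) :
    (pvSP xs).map (fun q => g q.1 q.2)
    = (List.range xs.length).flatMap (fun k => (xs.drop (k+1)).map (g (xs.getD k d))) := by
  induction xs with
  | nil => simp [pvSP]
  | cons x xs ih =>
    simp only [pvSP, List.map_append, List.map_map, List.length_cons, List.range_succ_eq_map,
      List.flatMap_cons, List.flatMap_map]
    simp only [List.drop_succ_cons, List.getD_cons_zero, List.getD_cons_succ]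
    simp [Function.comp_def, ih]

theorem pv_idxPairs_eq_sp {α β : Type} (xs : List α) (d : α) (g : α → α → β) :
    (PySem.List.pyRange 0 xs.length 1).flatMap (fun a =>
      (PySem.List.pyRange (a+1) xs.length 1).map (fun b =>
        g (PySem.List.pyGetD xs a d) (PySem.List.pyGetD xs b d)))
    = (pvSP xs).map (fun q => g q.1 q.2) := by
  rw [pv_sp_triangle xs d g, PySem.List.pyRange_zero_nat, List.flatMap_map]
  refine List.flatMap_congr (fun k hk => ?_)
  rw [List.mem_range] at hk
  have h1 : PySem.List.pyGetD xs (k : Int) d = xs.getD k d := PySem.List.pyGetD_natCast xs k d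
  have h2 : ((k : Int) + 1) = ((k + 1 : Nat) : Int) := by push_cast; ring
  have h3 := PySem.List.map_pyGetD_pyRange' (xs := xs) (d := d) (a := ((k+1 : Nat) : Int)) (by positivity)
  simp only [Int.toNat_natCast] at h3
  rw [h1, h2, ← h3, List.map_map]
  rfl

theorem pv_sp_count (post : List Int) (h : post.Pairwise (· < ·)) (i j : Int) (hij : i < j) :
    (pvSP post).count (i, j) = (if i ∈ post ∧ j ∈ post then 1 else 0) := by
  induction post with
  | nil => simp [pvSP]
  | cons x xs ih =>
    rw [List.pairwise_cons] at h
    obtain ⟨hx, hxs⟩ := h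
    rw [pvSP, List.count_append]
    have hxnotin : x ∉ xs := fun hm => lt_irrefl x (hx x hm)
    have hmap : (xs.map (fun y => (x, y))).count (i, j) = if x = i ∧ j ∈ xs then 1 else 0 := by
      by_cases hxi : x = i
      · subst hxi
        have hinj : Function.Injective (fun y : Int => ((x : Int), y)) := by
          intro a b hab; simpa using congrArg Prod.snd hab
        rw [List.count_map_of_injective xs _ hinj j]
        by_cases hj : j ∈ xs
        · have := hxs.imp (fun h => ne_of_lt h)
          simp [hj, List.count_eq_one_of_mem this hj]
        · simp [hj, List.count_eq_zero_of_not_mem hj]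
      · simp only [hxi, false_and, if_false]
        rw [List.count_eq_zero]
        simp only [List.mem_map, not_exists]
        rintro y ⟨hy, hexy⟩
        exact hxi (congrArg Prod.fst hexy)
    rw [hmap, ih hxs]
    simp only [List.mem_cons]
    by_cases h1 : x = i
    · subst h1
      simp [hxnotin, ne_of_gt hij]
    · have h1' : ¬ (x = i ∧ j ∈ xs) := fun hh => h1 hh.1
      rw [if_neg h1']
      by_cases h3 : i ∈ xs
      · have hxi : x < i := hx i h3
        simp [h3, ne_of_gt (lt_trans hxi hij), ne_of_gt hxi]
      · have hix : ¬ i = x := fun hh => h1 hh.symm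
        simp [h3, hix]


-- ---- generic list facts ----

theorem pv_pyGetD_mem_or {α : Type} (xs : List α) (i : Int) (d : α) :
    PySem.List.pyGetD xs i d = d ∨ PySem.List.pyGetD xs i d ∈ xs := by
  unfold PySem.List.pyGetD PySem.List.pyGet?
  rcases PySem.List.pyIdx? xs.length i with _ | k
  · simp
  · rcases h : xs[k]? with _ | v
    · simp [h]
    · simp only [h, Option.bind_some, Option.getD_some]
      exact Or.inr (List.mem_of_getElem? h)

theorem pv_flatMap_if_filter {α : Type} (l : List α) (p : α → Bool) :
    l.flatMap (fun x => if p x then [x] else []) = l.filter p := by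
  induction l with
  | nil => rfl
  | cons x xs ih => by_cases h : p x <;> simp [h, ih]

theorem pv_count_flatMap {α β : Type} [BEq β] (l : List α) (f : α → List β) (a : β) :
    (l.flatMap f).count a = (l.map (fun x => (f x).count a)).sum := by
  induction l with
  | nil => simp
  | cons x xs ih => simp [List.count_append, ih]

theorem pv_count_map_eq_countP {α β : Type} [BEq β] (l : List α) (f : α → β) (a : β) :
    (l.map f).count a = l.countP (fun x => f x == a) := by
  simp only [List.count, List.countP_map]
  rfl

-- two nodup lists, one contained in the other: counting "x ∈ u and p x" over s counts p over u
theorem pv_countP_exchange {α : Type} [DecidableEq α] (s u : List α) (p : α → Bool)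
    (hs : s.Nodup) (hu : u.Nodup) (hsub : ∀ x ∈ u, x ∈ s) :
    s.countP (fun x => decide (x ∈ u) && p x) = u.countP p := by
  rw [List.countP_eq_length_filter, List.countP_eq_length_filter]
  apply List.Perm.length_eq
  rw [List.perm_ext_iff_of_nodup (hs.filter _) (hu.filter _)]
  intro a
  simp only [List.mem_filter, Bool.and_eq_true, decide_eq_true_eq]
  constructor
  · rintro ⟨_, ha, hp⟩; exact ⟨ha, hp⟩
  · rintro ⟨ha, hp⟩; exact ⟨hsub a ha, ha, hp⟩

-- ---- PySem.Set facts specific to this proof ----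

theorem pv_ofList_nodup {α : Type} [BEq α] [LawfulBEq α] (xs : List α) (h : xs.Nodup) :
    PySem.Set.ofList xs = xs := by
  have key : ∀ (s : List α) (l : List α), (s ++ l).Nodup → List.foldl PySem.Set.add s l = s ++ l := by
    intro s l
    induction l generalizing s with
    | nil => intro _; simp
    | cons x xs ih =>
      intro hnd
      have hx : x ∉ s := by
        intro hm
        have := List.disjoint_of_nodup_append hnd
        exact this hm (by simp)
      have hadd : PySem.Set.add s x = s ++ [x] := by
        unfold PySem.Set.add PySem.Set.contains
        simp only [List.contains_iff_mem]
        simp [hx]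
      rw [List.foldl_cons, hadd, ih (s ++ [x]) (by simpa using hnd)]
      simp
  have := key [] xs (by simpa using h)
  simpa [PySem.Set.ofList, PySem.Set.empty] using this

theorem pv_set_update_self {α : Type} [BEq α] [LawfulBEq α] (s : PySem.Set α) (l : List α)
    (h : ∀ x ∈ l, x ∈ s) : PySem.Set.update s l = s := by
  unfold PySem.Set.update
  induction l generalizing s with
  | nil => rfl
  | cons x xs ih =>
    have hadd : PySem.Set.add s x = s := by
      unfold PySem.Set.add PySem.Set.contains
      simp [h x (by simp)]
    rw [List.foldl_cons, hadd]
    exact ih s (fun y hy => h y (by simp [hy]))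

-- ---- pvSP / pvPairs facts ----

theorem pv_mem_sp_sorted (xs : List Int) (hs : xs.Pairwise (· < ·)) (q : Int × Int)
    (h : q ∈ pvSP xs) : q.1 ∈ xs ∧ q.2 ∈ xs ∧ q.1 < q.2 := by
  induction xs with
  | nil => simp [pvSP] at h
  | cons x ys ih =>
    rw [List.pairwise_cons] at hs
    rw [pvSP, List.mem_append] at h
    rcases h with h | h
    · obtain ⟨y, hy, rfl⟩ := List.mem_map.mp h
      exact ⟨by simp, List.mem_cons_of_mem _ hy, hs.1 y hy⟩
    · have := ih hs.2 h
      exact ⟨List.mem_cons_of_mem _ this.1, List.mem_cons_of_mem _ this.2.1, this.2.2⟩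

-- ---- abbreviations for the two ports' intermediate data ----

def pvL (vocabs : List (String × List (String × Int))) : List String := (PySem.Dict.mk vocabs).keys
def pvl (vocabs : List (String × List (String × Int))) (i : Int) : String :=
  PySem.List.pyGetD (pvL vocabs) i ""
def pvKey (vocabs : List (String × List (String × Int))) (p : Int × Int) : String × String :=
  (pvl vocabs p.1, pvl vocabs p.2)
def pvAval (vocabs : List (String × List (String × Int))) (p : Int × Int) : Int :=
  PySem.Set.len (PySem.Set.inter
    (PySem.Set.ofList (((PySem.Dict.mk vocabs).getD (pvl vocabs p.1) []).map Prod.fst))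
    (PySem.Set.ofList (((PySem.Dict.mk vocabs).getD (pvl vocabs p.2) []).map Prod.fst)))
def pvDict0 (vocabs : List (String × List (String × Int))) : PySem.Dict (String × String) Int :=
  (pvPairs (vocabs.length : Int)).foldl (fun ov p => ov.insert (pvKey vocabs p) 0) PySem.Dict.empty
def pvFlat (vocabs : List (String × List (String × Int))) : List (String × Int) :=
  (PySem.List.enumerate ((PySem.Dict.mk vocabs).values)).flatMap
    (fun pv => ((PySem.Dict.mk pv.2).keys).map (fun t => (t, pv.1)))
def pvIndex (vocabs : List (String × List (String × Int))) : PySem.Dict String (List Int) :=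
  (pvFlat vocabs).foldl (fun d q => d.modify q.1 [] (· ++ [q.2])) PySem.Dict.empty
def pvEvents (vocabs : List (String × List (String × Int))) : List (String × String) :=
  (pvIndex vocabs).values.flatMap (fun post =>
    (pvSP post).map (fun q => (pvl vocabs q.1, pvl vocabs q.2)))

-- nested i<j index loops as one fold over pvPairs
theorem pv_foldl_pairs {γ : Type} (n : Int) (f : γ → Int → Int → γ) (init : γ) :
    (PySem.List.pyRange 0 n 1).foldl (fun acc i =>
      (PySem.List.pyRange (i+1) n 1).foldl (fun acc j => f acc i j) acc) init
    = (pvPairs n).foldl (fun acc p => f acc p.1 p.2) init := by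
  rw [pvPairs, List.foldl_flatMap]
  simp only [List.foldl_map]

-- the two ports, re-expressed through the abbreviations
theorem pv_A_eq (vocabs : List (String × List (String × Int))) :
    get_vocab_overlap vocabs
    = ((pvPairs (vocabs.length : Int)).foldl
        (fun ov p => ov.insert (pvKey vocabs p) (pvAval vocabs p)) PySem.Dict.empty).items.map
        (fun p => (p.1.1, p.1.2, p.2)) := by
  have h := pv_foldl_pairs (n := ((vocabs.map (fun x : String × List (String × Int) => x.1)).length : Int))
    (f := fun (ov : PySem.Dict (String × String) Int) i j =>
      ov.insert (pvl vocabs i, pvl vocabs j) (pvAval vocabs (i, j)))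
    (init := PySem.Dict.empty)
  unfold get_vocab_overlap
  refine (congrArg (fun d : PySem.Dict (String × String) Int =>
    d.items.map (fun p => (p.1.1, p.1.2, p.2))) h).trans ?_
  simp only [List.length_map]
  rfl

theorem pv_fold_events_chunk (vocabs : List (String × List (String × Int))) (post : List Int)
    (ov : PySem.Dict (String × String) Int) :
    (PySem.List.pyRange 0 post.length 1).foldl (fun ov a =>
      (PySem.List.pyRange (a+1) post.length 1).foldl (fun ov b =>
        ov.modify (PySem.List.pyGetD ((PySem.Dict.mk vocabs).keys) (PySem.List.pyGetD post a 0) "",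
                   PySem.List.pyGetD ((PySem.Dict.mk vocabs).keys) (PySem.List.pyGetD post b 0) "")
          0 (· + 1)) ov) ov
    = ((pvSP post).map (fun q => (pvl vocabs q.1, pvl vocabs q.2))).foldl
        (fun ov k => ov.modify k 0 (· + 1)) ov := by
  rw [← pv_idxPairs_eq_sp post 0 (fun u v => (pvl vocabs u, pvl vocabs v)), List.foldl_flatMap]
  simp only [List.foldl_map]
  rfl

theorem pv_B_eq (vocabs : List (String × List (String × Int))) :
    get_vocab_overlap_alt vocabs
    = ((pvEvents vocabs).foldl (fun ov k => ov.modify k 0 (· + 1)) (pvDict0 vocabs)).items.map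
        (fun p => (p.1.1, p.1.2, p.2)) := by
  have hidx : pvIndex vocabs
      = (PySem.List.enumerate ((PySem.Dict.mk vocabs).values)).foldl (fun d pv =>
          ((PySem.Dict.mk pv.2).keys).foldl (fun d token => d.modify token [] (· ++ [pv.1])) d)
          PySem.Dict.empty := by
    rw [pvIndex, pvFlat, List.foldl_flatMap]
    simp only [List.foldl_map]
  unfold get_vocab_overlap_alt
  conv_rhs => rw [pvEvents, List.foldl_flatMap, hidx, pvDict0]
  simp only [pv_fold_events_chunk vocabs]
  simp only [pv_foldl_pairs]
  simp only [PySem.Dict.keys, List.length_map]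
  rfl


-- ---- value-level facts ----

theorem pv_l_inj (vocabs : List (String × List (String × Int)))
    (hnd : (pvL vocabs).Nodup) (i j : Int)
    (hi0 : 0 ≤ i) (hi1 : i < (vocabs.length : Int)) (hj0 : 0 ≤ j) (hj1 : j < (vocabs.length : Int))
    (he : pvl vocabs i = pvl vocabs j) : i = j := by
  have hlen : (pvL vocabs).length = vocabs.length := by
    simp [pvL, PySem.Dict.keys]
  rw [pvl, pvl, PySem.List.pyGetD_eq_getElem _ _ hi0 (by omega),
    PySem.List.pyGetD_eq_getElem _ _ hj0 (by omega)] at he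
  have := (List.Nodup.getElem_inj_iff hnd).mp he
  omega

theorem pv_nodup_pairs (n : Int) : (pvPairs n).Nodup := by
  rw [pvPairs, List.nodup_flatMap]
  constructor
  · intro i _
    exact (PySem.List.nodup_pyRange_one _ _).map
      (fun a b hab => (Prod.mk.injEq _ _ _ _ ▸ hab : _ ∧ _).2)
  · have := PySem.List.nodup_pyRange_one 0 n
    refine List.Pairwise.imp_of_mem ?_ (this.imp (fun h => h))
    intro i j _ _ hne x hx hy
    obtain ⟨_, _, rfl⟩ := List.mem_map.mp hx
    obtain ⟨_, _, h2⟩ := List.mem_map.mp hy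
    exact hne (congrArg Prod.fst h2.symm)

theorem pv_nodup_keymap (vocabs : List (String × List (String × Int)))
    (hnd : (pvL vocabs).Nodup) :
    ((pvPairs (vocabs.length : Int)).map (pvKey vocabs)).Nodup := by
  refine List.Nodup.map_on ?_ (pv_nodup_pairs _)
  intro p hp q hq he
  rw [pv_mem_pairs] at hp hq
  have h1 := pv_l_inj vocabs hnd p.1 q.1 (by omega) (by omega) (by omega) (by omega)
    (congrArg Prod.fst he)
  have h2 := pv_l_inj vocabs hnd p.2 q.2 (by omega) (by omega) (by omega) (by omega)
    (congrArg Prod.snd he)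
  exact Prod.ext h1 h2

theorem pv_items_fold_insert (vocabs : List (String × List (String × Int)))
    (hnd : (pvL vocabs).Nodup) (v : Int × Int → Int) :
    ((pvPairs (vocabs.length : Int)).foldl
      (fun ov p => ov.insert (pvKey vocabs p) (v p)) PySem.Dict.empty).items
    = (pvPairs (vocabs.length : Int)).map (fun p => (pvKey vocabs p, v p)) := by
  have := PySem.Dict.items_foldl_insert_fresh (pvPairs (vocabs.length : Int))
    (pvKey vocabs) v PySem.Dict.empty (fun a _ => rfl) (pv_nodup_keymap vocabs hnd)
  simpa using this

theorem pv_K_nodup (vocabs : List (String × List (String × Int)))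
    (hPre : Pre_get_vocab_overlap vocabs) (i : Int) : (pvK vocabs i).Nodup := by
  rw [pvK]
  rcases pv_pyGetD_mem_or (vocabs.map Prod.snd) i [] with h | h
  · rw [h]; exact List.nodup_nil
  · obtain ⟨p, hp, he⟩ := List.mem_map.mp h
    rw [← he]
    exact hPre.2 p hp

theorem pv_index_getD (vocabs : List (String × List (String × Int))) (t : String) :
    (pvIndex vocabs).getD t []
    = ((pvFlat vocabs).filter (fun q => q.1 == t)).map (fun q => q.2) := by
  rw [pvIndex]
  have := PySem.Dict.getD_foldl_modify_append (pvFlat vocabs) PySem.Dict.empty t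
  simpa using this

theorem pv_index_keys (vocabs : List (String × List (String × Int))) :
    (pvIndex vocabs).keys = PySem.Set.ofList ((pvFlat vocabs).map Prod.fst) := by
  rw [pvIndex]
  have := PySem.Dict.keys_foldl_modify_key (pvFlat vocabs) Prod.fst []
    (fun _ q => (· ++ [q.2])) PySem.Dict.empty
  simpa [PySem.Set.ofList, PySem.Set.update, PySem.Dict.keys, PySem.Dict.empty] using this

theorem pv_index_nodup (vocabs : List (String × List (String × Int))) :
    (pvIndex vocabs).keys.Nodup := by
  rw [pvIndex]
  exact PySem.Dict.nodup_keys_foldl_modify_key (pvFlat vocabs) Prod.fst []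
    (fun _ q => (· ++ [q.2])) PySem.Dict.empty (by simp [PySem.Dict.keys, PySem.Dict.empty])

theorem pv_flat_eq (vocabs : List (String × List (String × Int))) :
    pvFlat vocabs = (PySem.List.pyRange 0 (vocabs.length : Int) 1).flatMap
      (fun j => (pvK vocabs j).map (fun t => (t, j))) := by
  rw [pvFlat, PySem.List.enumerate_eq_map_pyRange _ [], List.flatMap_map]
  have hlen : PySem.List.len ((PySem.Dict.mk vocabs).values) = (vocabs.length : Int) := by
    simp [PySem.List.len_eq, PySem.Dict.values]
  rw [hlen]
  rfl

theorem pv_posting (vocabs : List (String × List (String × Int)))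
    (hPre : Pre_get_vocab_overlap vocabs) (t : String) :
    (pvIndex vocabs).getD t [] = pvPost vocabs t := by
  rw [pv_index_getD, pv_flat_eq, List.filter_flatMap, List.map_flatMap, pvPost,
    ← pv_flatMap_if_filter]
  refine List.flatMap_congr (fun j _ => ?_)
  rw [List.filter_map]
  have hstep : ((pvK vocabs j).filter ((fun q : String × Int => q.1 == t) ∘ (fun t' => (t', j))))
      = (pvK vocabs j).filter (fun t' => t' == t) := rfl
  rw [hstep, List.filter_beq]
  by_cases hm : t ∈ pvK vocabs j
  · rw [List.count_eq_one_of_mem (pv_K_nodup vocabs hPre j) hm]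
    simp [hm]
  · rw [List.count_eq_zero_of_not_mem hm]
    simp [hm]

theorem pv_post_sorted (vocabs : List (String × List (String × Int))) (t : String) :
    (pvPost vocabs t).Pairwise (· < ·) :=
  (PySem.List.pairwise_lt_pyRange_one 0 _).filter _

theorem pv_mem_post (vocabs : List (String × List (String × Int))) (t : String) (i : Int) :
    i ∈ pvPost vocabs t ↔ (0 ≤ i ∧ i < (vocabs.length : Int) ∧ t ∈ pvK vocabs i) := by
  rw [pvPost, List.mem_filter, PySem.List.mem_pyRange_one]
  simp [and_assoc]

theorem pv_mem_toks (vocabs : List (String × List (String × Int))) (t : String) :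
    t ∈ PySem.Set.ofList ((pvFlat vocabs).map Prod.fst)
    ↔ ∃ j : Int, 0 ≤ j ∧ j < (vocabs.length : Int) ∧ t ∈ pvK vocabs j := by
  rw [PySem.Set.mem_ofList, pv_flat_eq, List.map_flatMap]
  simp only [List.mem_flatMap, List.map_map, List.mem_map, PySem.List.mem_pyRange_one]
  constructor
  · rintro ⟨j, ⟨hj0, hj1⟩, x, hx, rfl⟩
    exact ⟨j, hj0, hj1, hx⟩
  · rintro ⟨j, hj0, hj1, hx⟩
    exact ⟨j, ⟨hj0, hj1⟩, t, hx, rfl⟩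

theorem pv_events_count (vocabs : List (String × List (String × Int)))
    (hPre : Pre_get_vocab_overlap vocabs) (p : Int × Int)
    (hp : p ∈ pvPairs (vocabs.length : Int)) :
    (pvEvents vocabs).count (pvKey vocabs p)
    = (pvK vocabs p.1).countP (fun t => decide (t ∈ pvK vocabs p.2)) := by
  rw [pv_mem_pairs] at hp
  have hnd : (pvL vocabs).Nodup := by
    have : pvL vocabs = vocabs.map Prod.fst := rfl
    rw [this]; exact hPre.1
  have hvals : (pvIndex vocabs).values
      = (PySem.Set.ofList ((pvFlat vocabs).map Prod.fst)).map (fun t => pvPost vocabs t) := by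
    rw [PySem.Dict.values_eq_map_keys _ (pv_index_nodup vocabs) [], pv_index_keys]
    exact List.map_congr_left (fun t _ => pv_posting vocabs hPre t)
  rw [pvEvents, hvals, List.flatMap_map, pv_count_flatMap]
  have hchunk : ∀ t, ((pvSP (pvPost vocabs t)).map
        (fun q => (pvl vocabs q.1, pvl vocabs q.2))).count (pvKey vocabs p)
      = (if t ∈ pvK vocabs p.1 ∧ t ∈ pvK vocabs p.2 then 1 else 0) := by
    intro t
    rw [pv_count_map_eq_countP]
    have hcp : (pvSP (pvPost vocabs t)).countP
          (fun q => (pvl vocabs q.1, pvl vocabs q.2) == pvKey vocabs p)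
        = (pvSP (pvPost vocabs t)).countP (fun q => q == (p.1, p.2)) := by
      refine List.countP_congr (fun q hq => ?_)
      have hmem := pv_mem_sp_sorted _ (pv_post_sorted vocabs t) q hq
      have hq1 := (pv_mem_post vocabs t q.1).mp hmem.1
      have hq2 := (pv_mem_post vocabs t q.2).mp hmem.2.1
      simp only [beq_iff_eq, Prod.ext_iff]
      constructor
      · rintro ⟨h1, h2⟩
        exact ⟨pv_l_inj vocabs hnd q.1 p.1 (by omega) (by omega) (by omega) (by omega) h1,
               pv_l_inj vocabs hnd q.2 p.2 (by omega) (by omega) (by omega) (by omega) h2⟩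
      · rintro ⟨h1, h2⟩
        exact ⟨congrArg (pvl vocabs) h1, congrArg (pvl vocabs) h2⟩
    rw [hcp]
    have hcc : (pvSP (pvPost vocabs t)).countP (fun q => q == (p.1, p.2))
        = (pvSP (pvPost vocabs t)).count (p.1, p.2) := rfl
    rw [hcc, pv_sp_count _ (pv_post_sorted vocabs t) p.1 p.2 (by omega)]
    have hiff : (p.1 ∈ pvPost vocabs t ∧ p.2 ∈ pvPost vocabs t)
        ↔ (t ∈ pvK vocabs p.1 ∧ t ∈ pvK vocabs p.2) := by
      rw [pv_mem_post, pv_mem_post]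
      constructor
      · rintro ⟨⟨_, _, h1⟩, _, _, h2⟩; exact ⟨h1, h2⟩
      · rintro ⟨h1, h2⟩; exact ⟨⟨by omega, by omega, h1⟩, by omega, by omega, h2⟩
    simp only [hiff]
  calc (((PySem.Set.ofList ((pvFlat vocabs).map Prod.fst)).map (fun t =>
          ((pvSP (pvPost vocabs t)).map
            (fun q => (pvl vocabs q.1, pvl vocabs q.2))).count (pvKey vocabs p)))).sum
      = ((PySem.Set.ofList ((pvFlat vocabs).map Prod.fst)).map (fun t =>
          if (fun t => decide (t ∈ pvK vocabs p.1) && decide (t ∈ pvK vocabs p.2)) t = true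
          then 1 else 0)).sum := by
        refine congrArg List.sum (List.map_congr_left (fun t _ => ?_))
        rw [hchunk t]
        by_cases ha : t ∈ pvK vocabs p.1 <;> by_cases hb : t ∈ pvK vocabs p.2 <;> simp [ha, hb]
    _ = (PySem.Set.ofList ((pvFlat vocabs).map Prod.fst)).countP
          (fun t => decide (t ∈ pvK vocabs p.1) && decide (t ∈ pvK vocabs p.2)) :=
        PySem.List.sum_map_ite_one_zero_nat _ _
    _ = (pvK vocabs p.1).countP (fun t => decide (t ∈ pvK vocabs p.2)) := by
        refine pv_countP_exchange _ _ _ (PySem.Set.nodup_ofList _)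
          (pv_K_nodup vocabs hPre p.1) (fun x hx => ?_)
        exact (pv_mem_toks vocabs x).mpr ⟨p.1, by omega, by omega, hx⟩

theorem pv_dict_find (vocabs : List (String × List (String × Int))) (k : Nat)
    (hk : k < vocabs.length) (hnd : (vocabs.map Prod.fst).Nodup) :
    List.find? (fun q => q.1 == vocabs[k].1) vocabs = some vocabs[k] := by
  induction vocabs generalizing k with
  | nil => simp at hk
  | cons x xs ih =>
    rw [List.map_cons, List.nodup_cons] at hnd
    cases k with
    | zero => simp
    | succ m =>
      have hm : m < xs.length := by simpa using hk
      have hne : ¬ (x.1 == xs[m].1) = true := by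
        simp only [beq_iff_eq]
        intro he
        exact hnd.1 (he ▸ List.mem_map.mpr ⟨xs[m], List.getElem_mem hm, rfl⟩)
      have hgd : (x :: xs)[m+1] = xs[m] := by simp
      rw [hgd, List.find?_cons_of_neg (by simpa using hne)]
      exact ih m hm hnd.2

theorem pv_dict_getD (vocabs : List (String × List (String × Int)))
    (hnd : (vocabs.map Prod.fst).Nodup) (i : Int)
    (hi0 : 0 ≤ i) (hi1 : i < (vocabs.length : Int)) :
    (PySem.Dict.mk vocabs).getD (pvl vocabs i) []
    = PySem.List.pyGetD (vocabs.map Prod.snd) i [] := by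
  have hk : i.toNat < vocabs.length := by omega
  have h1 : pvl vocabs i = vocabs[i.toNat].1 := by
    rw [pvl, PySem.List.pyGetD_eq_getElem _ _ hi0 (by simp [pvL, PySem.Dict.keys]; omega)]
    simp [pvL, PySem.Dict.keys]
  have h2 : PySem.List.pyGetD (vocabs.map Prod.snd) i []
      = vocabs[i.toNat].2 := by
    rw [PySem.List.pyGetD_eq_getElem _ _ hi0 (by simp; omega)]
    simp
  rw [h1, h2]
  unfold PySem.Dict.getD PySem.Dict.get?
  rw [show (PySem.Dict.mk vocabs).items = vocabs from rfl, pv_dict_find vocabs i.toNat hk hnd]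
  rfl

theorem pv_aval (vocabs : List (String × List (String × Int)))
    (hPre : Pre_get_vocab_overlap vocabs) (p : Int × Int)
    (hp : p ∈ pvPairs (vocabs.length : Int)) :
    pvAval vocabs p
    = ((pvK vocabs p.1).countP (fun t => decide (t ∈ pvK vocabs p.2)) : Int) := by
  rw [pv_mem_pairs] at hp
  rw [pvAval, pv_dict_getD vocabs hPre.1 p.1 (by omega) (by omega),
    pv_dict_getD vocabs hPre.1 p.2 (by omega) (by omega)]
  rw [show ∀ i, (PySem.List.pyGetD (vocabs.map Prod.snd) i []).map Prod.fst = pvK vocabs i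
      from fun _ => rfl, show ∀ i, (PySem.List.pyGetD (vocabs.map Prod.snd) i []).map Prod.fst
      = pvK vocabs i from fun _ => rfl]
  rw [pv_ofList_nodup _ (pv_K_nodup vocabs hPre p.1), pv_ofList_nodup _ (pv_K_nodup vocabs hPre p.2)]
  unfold PySem.Set.inter PySem.Set.len PySem.Set.contains
  rw [List.countP_eq_length_filter]
  congr 2
  refine List.filter_congr (fun t _ => ?_)
  simp

theorem pv_getD_zero (items : List ((String × String) × Int)) (k : String × String)
    (h : ∀ q ∈ items, q.2 = 0) : (PySem.Dict.mk items).getD k 0 = 0 := by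
  unfold PySem.Dict.getD PySem.Dict.get?
  rcases hf : List.find? (fun q => q.1 == k) (PySem.Dict.mk items).items with _ | q
  · rw [hf]; rfl
  · simp only [hf, Option.map_some, Option.getD_some]
    exact h q (List.mem_of_find?_eq_some hf)

theorem pv_dict0_items (vocabs : List (String × List (String × Int)))
    (hnd : (pvL vocabs).Nodup) :
    (pvDict0 vocabs).items
    = (pvPairs (vocabs.length : Int)).map (fun p => (pvKey vocabs p, (0 : Int))) :=
  pv_items_fold_insert vocabs hnd (fun _ => 0)

theorem pv_final_keys (vocabs : List (String × List (String × Int)))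
    (hPre : Pre_get_vocab_overlap vocabs) :
    ((pvEvents vocabs).foldl (fun ov k => ov.modify k 0 (· + 1)) (pvDict0 vocabs)).keys
    = (pvDict0 vocabs).keys := by
  have hkeys := PySem.Dict.keys_foldl_modify (pvEvents vocabs) 0 (fun _ _ => (· + 1))
    (pvDict0 vocabs)
  rw [hkeys]
  refine pv_set_update_self _ _ (fun e he => ?_)
  have hnd : (pvL vocabs).Nodup := hPre.1
  rw [pvEvents, List.mem_flatMap] at he
  obtain ⟨post, hpost, he⟩ := he
  have hvals : post ∈ ((pvIndex vocabs).keys.map (fun t => (pvIndex vocabs).getD t [])) := by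
    rw [← PySem.Dict.values_eq_map_keys _ (pv_index_nodup vocabs) []]
    exact hpost
  obtain ⟨t, _, rfl⟩ := List.mem_map.mp hvals
  rw [pv_posting vocabs hPre t] at he
  obtain ⟨q, hq, rfl⟩ := List.mem_map.mp he
  have hmem := pv_mem_sp_sorted _ (pv_post_sorted vocabs t) q hq
  have hq1 := (pv_mem_post vocabs t q.1).mp hmem.1
  have hq2 := (pv_mem_post vocabs t q.2).mp hmem.2.1
  have hqpairs : (q.1, q.2) ∈ pvPairs (vocabs.length : Int) := by
    rw [pv_mem_pairs]
    exact ⟨by omega, by simpa using hmem.2.2, by omega⟩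
  have hkeys0 : (pvDict0 vocabs).keys
      = (pvPairs (vocabs.length : Int)).map (pvKey vocabs) := by
    have h1 : (pvDict0 vocabs).keys = (pvDict0 vocabs).items.map (fun x => x.1) := rfl
    rw [h1, pv_dict0_items vocabs hnd, List.map_map]
    rfl
  have : (pvl vocabs q.1, pvl vocabs q.2) = pvKey vocabs (q.1, q.2) := rfl
  rw [this, hkeys0]
  exact List.mem_map_of_mem hqpairs

theorem pv_final_items (vocabs : List (String × List (String × Int)))
    (hPre : Pre_get_vocab_overlap vocabs) (p : Int × Int)
    (hp : p ∈ pvPairs (vocabs.length : Int)) :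
    ((pvEvents vocabs).foldl (fun ov k => ov.modify k 0 (· + 1)) (pvDict0 vocabs)).getD
      (pvKey vocabs p) 0 = pvAval vocabs p := by
  have hnd : (pvL vocabs).Nodup := hPre.1
  rw [PySem.Dict.getD_foldl_modify_add_one (pvEvents vocabs) (pvDict0 vocabs) (pvKey vocabs p)]
  have hitems : ∀ q ∈ (pvDict0 vocabs).items, q.2 = 0 := by
    rw [pv_dict0_items vocabs hnd]
    intro q hq
    obtain ⟨a, _, he⟩ := List.mem_map.mp hq
    rw [← he]
  have h0 : (pvDict0 vocabs).getD (pvKey vocabs p) 0 = 0 :=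
    pv_getD_zero (pvDict0 vocabs).items (pvKey vocabs p) hitems
  rw [h0, pv_events_count vocabs hPre p hp, pv_aval vocabs hPre p hp]
  simp

-- ===== VERDICT (by name: the statement is the Claim_ definition above) =====
theorem get_vocab_overlap_spec : Claim_equal_get_vocab_overlap := by
  intro vocabs _ hPre
  unfold Spec_get_vocab_overlap
  have hnd : (pvL vocabs).Nodup := hPre.1
  rw [pv_A_eq, pv_B_eq, pv_items_fold_insert vocabs hnd (pvAval vocabs)]
  have hkeys : ((pvEvents vocabs).foldl (fun ov k => ov.modify k 0 (· + 1)) (pvDict0 vocabs)).keys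
      = (pvPairs (vocabs.length : Int)).map (pvKey vocabs) := by
    rw [pv_final_keys vocabs hPre]
    have h1 : (pvDict0 vocabs).keys = (pvDict0 vocabs).items.map (fun x => x.1) := rfl
    rw [h1, pv_dict0_items vocabs hnd, List.map_map]
    rfl
  have hknd : ((pvEvents vocabs).foldl (fun ov k => ov.modify k 0 (· + 1)) (pvDict0 vocabs)).keys.Nodup := by
    rw [hkeys]; exact pv_nodup_keymap vocabs hnd
  rw [PySem.Dict.items_eq_map_keys _ hknd 0, hkeys, List.map_map, List.map_map, List.map_map]
  refine List.map_congr_left (fun p hp => ?_)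
  have hval := pv_final_items vocabs hPre p hp
  simp only [Function.comp_apply, hval]
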